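-- pv_equiv track=rewrite | github.com/Azaken1248/VPropel | problems-src/LuckyKids(05122022).py | ChitTransition
-- ===== SOURCE A (Python) =====
-- import copy
--
-- def transpose(Matrix):
--     t = [[Matrix[j][i]for j in range(len(Matrix))] for i in range(len(Matrix[0]))]
--     return t
--
-- def ChitTransition(Matrix,num,pi,qu):
--     new_M = copy.deepcopy(Matrix)
--     t = transpose(Matrix)
--
--     if(num == pi):
--         for i in range(len(Matrix)):
--             for j in range(len(Matrix[i])):
--                 if(Matrix[i][j] == num):
--                     if(qu in Matrix[i] or qu in t[j]):
--                         new_M[i][j] = qu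
--
--     else:
--         for i in range(len(Matrix)):
--             for j in range(len(Matrix[i])):
--                 if(Matrix[i][j] == num):
--                     if(pi in Matrix[i] or pi in t[j]):
--                         new_M[i][j] = pi
--
--
--     return new_M
-- ===== SOURCE B (Python) =====
-- def ChitTransition(Matrix, num, pi, qu):
--     target = qu if num == pi else pi
--     ncols = len(Matrix[0])
--     rows_with = [target in row for row in Matrix]
--     cols_with = [any(row[j] == target for row in Matrix) for j in range(ncols)]
--     return [[target if cell == num and (rows_with[i] or cols_with[j]) else cell
--              for j, cell in enumerate(row)]
--             for i, row in enumerate(Matrix)]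
-- ===== Notes on version B (the rewrite author's own statement) =====
-- stated objective: faster
-- what changed: B precomputes per-row and per-column boolean target-presence tables in one scan and builds the result in a single comprehension, instead of A's deepcopy + transpose + per-cell row/column membership scans.
import Mathlib
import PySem

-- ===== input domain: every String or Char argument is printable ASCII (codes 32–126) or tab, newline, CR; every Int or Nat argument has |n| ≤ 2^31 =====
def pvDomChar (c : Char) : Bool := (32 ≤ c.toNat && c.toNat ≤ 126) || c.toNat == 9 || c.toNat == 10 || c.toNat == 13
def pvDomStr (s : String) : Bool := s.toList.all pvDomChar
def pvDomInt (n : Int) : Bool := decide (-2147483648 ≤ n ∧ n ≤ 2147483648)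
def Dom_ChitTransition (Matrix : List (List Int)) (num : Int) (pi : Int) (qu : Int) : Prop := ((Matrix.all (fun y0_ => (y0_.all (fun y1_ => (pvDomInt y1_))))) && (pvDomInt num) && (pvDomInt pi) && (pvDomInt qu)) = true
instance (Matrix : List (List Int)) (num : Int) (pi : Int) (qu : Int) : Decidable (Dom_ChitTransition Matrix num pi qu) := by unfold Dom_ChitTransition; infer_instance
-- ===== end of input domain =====

-- B replaces A's transpose + per-cell row/column membership scans by per-row and
-- per-column boolean target-presence tables built once, then a single pass; equivalence
-- is about the return value only (A does not mutate its arguments).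

-- ===== PORT A =====
-- transpose(Matrix): indexing is total via getD; every access is in range on Pre_.
def pyTranspose (M : List (List Int)) : List (List Int) :=
  (List.range (M.headD []).length).map (fun i =>
    (List.range M.length).map (fun j => (M.getD j []).getD i 0))

def ChitTransition (Matrix : List (List Int)) (num : Int) (pi : Int) (qu : Int) : List (List Int) :=
  let t := pyTranspose Matrix
  if num = pi then
    -- new_M[i][j] = qu when Matrix[i][j] == num and qu in row i or column j
    Matrix.map (fun row => row.mapIdx (fun j c =>
      if c = num then (if qu ∈ row ∨ qu ∈ t.getD j [] then qu else c) else c))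
  else
    Matrix.map (fun row => row.mapIdx (fun j c =>
      if c = num then (if pi ∈ row ∨ pi ∈ t.getD j [] then pi else c) else c))

-- ===== PORT B =====
def ChitTransition_alt (Matrix : List (List Int)) (num : Int) (pi : Int) (qu : Int) : List (List Int) :=
  let target := if num = pi then qu else pi
  let ncols := (Matrix.headD []).length
  let rowsWith := Matrix.map (fun row => row.contains target)
  let colsWith := (List.range ncols).map (fun j => Matrix.any (fun row => row.getD j 0 == target))
  Matrix.mapIdx (fun i row => row.mapIdx (fun j c =>
    if c == num && (rowsWith.getD i false || colsWith.getD j false) then target else c))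

-- ===== PRECONDITION & SPEC =====
-- Pre_ is exactly the inputs on which Python A returns: Matrix nonempty, no row shorter
-- than row 0 (else transpose raises IndexError), and any num-cell in a column beyond
-- row 0's width lies in a row containing the target (else `t[j]` raises IndexError).
def Pre_ChitTransition (Matrix : List (List Int)) (num : Int) (pi : Int) (qu : Int) : Prop :=
  Matrix ≠ [] ∧
  (∀ row ∈ Matrix, (Matrix.headD []).length ≤ row.length) ∧
  (∀ row ∈ Matrix, ∀ j : Nat, j < row.length → (Matrix.headD []).length ≤ j →
      row.getD j 0 = num → (if num = pi then qu else pi) ∈ row)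
instance (Matrix : List (List Int)) (num : Int) (pi : Int) (qu : Int) : Decidable (Pre_ChitTransition Matrix num pi qu) := by unfold Pre_ChitTransition; infer_instance

def pvWitness_ChitTransition : List (List Int) × Int × Int × Int := ([[1, 2], [2, 3]], 2, 3, 0)

def Spec_ChitTransition (Matrix : List (List Int)) (num : Int) (pi : Int) (qu : Int) (out : List (List Int)) : Prop := out = ChitTransition_alt Matrix num pi qu
instance (Matrix : List (List Int)) (num : Int) (pi : Int) (qu : Int) (out : List (List Int)) : Decidable (Spec_ChitTransition Matrix num pi qu out) := by unfold Spec_ChitTransition; infer_instance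

-- ===== CLAIM (what is proved, stated in full; the proofs are below) =====
def Claim_equal_ChitTransition : Prop := ∀ (Matrix : List (List Int)) (num : Int) (pi : Int) (qu : Int), Dom_ChitTransition Matrix num pi qu → Pre_ChitTransition Matrix num pi qu → Spec_ChitTransition Matrix num pi qu (ChitTransition Matrix num pi qu)

-- ===== LEMMAS AND PROOFS =====

-- ∃ over indices of M ↔ ∃ over members of M
theorem pv_exists_getD_mem (M : List (List Int)) (P : List Int → Prop) :
    (∃ r : Nat, r < M.length ∧ P (M.getD r [])) ↔ ∃ row ∈ M, P row := by
  constructor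
  · rintro ⟨r, hr, hP⟩
    exact ⟨M.getD r [], by rw [List.getD_eq_getElem _ _ hr]; exact List.getElem_mem hr, hP⟩
  · rintro ⟨row, hmem, hP⟩
    obtain ⟨r, hr, hEq⟩ := List.mem_iff_getElem.mp hmem
    exact ⟨r, hr, by rw [List.getD_eq_getElem _ _ hr, hEq]; exact hP⟩

-- membership in column j of the transpose ↔ B's any-scan of column j
theorem pv_col_mem (M : List (List Int)) (j : Nat) (tgt : Int) :
    (tgt ∈ (List.range M.length).map (fun r => (M.getD r []).getD j 0)) ↔
      (M.any (fun row => row.getD j 0 == tgt) = true) := by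
  simp only [List.mem_map, List.mem_range, List.any_eq_true, beq_iff_eq]
  constructor
  · rintro ⟨r, hr, hEq⟩
    exact (pv_exists_getD_mem M (fun row => row.getD j 0 = tgt)).mp ⟨r, hr, hEq⟩
  · intro h
    obtain ⟨r, hr, hP⟩ := (pv_exists_getD_mem M (fun row => row.getD j 0 = tgt)).mpr h
    exact ⟨r, hr, hP⟩

-- the branch-free core: A's per-cell scan equals B's table lookup, for any target
theorem pv_key (M : List (List Int)) (num tgt : Int) :
    M.map (fun row => row.mapIdx (fun j c =>
      if c = num then (if tgt ∈ row ∨ tgt ∈ (pyTranspose M).getD j [] then tgt else c) else c))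
    = M.mapIdx (fun i row => row.mapIdx (fun j c =>
        if c == num && ((M.map (fun row => row.contains tgt)).getD i false ||
            ((List.range (M.headD []).length).map
              (fun j => M.any (fun row => row.getD j 0 == tgt))).getD j false)
        then tgt else c)) := by
  apply List.ext_getElem
  · simp
  · intro i h1 h2
    have hi : i < M.length := by simpa using h1
    simp only [List.getElem_map, List.getElem_mapIdx]
    apply List.ext_getElem
    · simp
    · intro j hj1 hj2
      have hjrow : j < (M[i]'hi).length := by simpa using hj1
      simp only [List.getElem_mapIdx]
      have hrows : (M.map (fun row => row.contains tgt)).getD i false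
          = (M[i]'hi).contains tgt := by
        rw [List.getD_eq_getElem _ _ (by simpa using hi), List.getElem_map]
      by_cases hjn : j < (M.headD []).length
      · have htj : (pyTranspose M).getD j []
            = (List.range M.length).map (fun r => (M.getD r []).getD j 0) := by
          unfold pyTranspose
          rw [List.getD_eq_getElem _ _ (by simpa using hjn), List.getElem_map,
            List.getElem_range]
        have hcols : ((List.range (M.headD []).length).map
            (fun j => M.any (fun row => row.getD j 0 == tgt))).getD j false
            = M.any (fun row => row.getD j 0 == tgt) := by
          rw [List.getD_eq_getElem _ _ (by simpa using hjn), List.getElem_map,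
            List.getElem_range]
        simp only [htj, hrows, hcols]
        have hcond : (((M[i]'hi)[j]'hjrow) == num &&
              ((M[i]'hi).contains tgt || M.any (fun row => row.getD j 0 == tgt))) = true ↔
            ((M[i]'hi)[j]'hjrow) = num ∧ (tgt ∈ (M[i]'hi) ∨
              tgt ∈ (List.range M.length).map (fun r => (M.getD r []).getD j 0)) := by
          simp only [Bool.and_eq_true, Bool.or_eq_true, beq_iff_eq,
            List.contains_iff_mem, pv_col_mem]
        by_cases hc : ((M[i]'hi)[j]'hjrow) = num
        · by_cases hm : tgt ∈ (M[i]'hi) ∨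
              tgt ∈ (List.range M.length).map (fun r => (M.getD r []).getD j 0)
          · rw [if_pos hc, if_pos hm, if_pos (hcond.mpr ⟨hc, hm⟩)]
          · rw [if_pos hc, if_neg hm, if_neg (fun h => hm (hcond.mp h).2)]
        · rw [if_neg hc, if_neg (fun h => hc (hcond.mp h).1)]
      · -- column index beyond row 0's width: both sides see "no column hit"
        have hle : (M.headD []).length ≤ j := Nat.le_of_not_lt hjn
        have htj : (pyTranspose M).getD j [] = [] := by
          apply List.getD_eq_default
          simpa [pyTranspose, List.headD_eq_head?_getD] using hle
        have hcols : ((List.range (M.headD []).length).map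
            (fun j => M.any (fun row => row.getD j 0 == tgt))).getD j false = false := by
          apply List.getD_eq_default
          simpa [List.headD_eq_head?_getD] using hle
        simp only [htj, hrows, hcols, Bool.or_false]
        have hcond : (((M[i]'hi)[j]'hjrow) == num && (M[i]'hi).contains tgt) = true ↔
            ((M[i]'hi)[j]'hjrow) = num ∧ tgt ∈ (M[i]'hi) := by
          simp only [Bool.and_eq_true, beq_iff_eq, List.contains_iff_mem]
        by_cases hc : ((M[i]'hi)[j]'hjrow) = num
        · by_cases hm : tgt ∈ (M[i]'hi)
          · rw [if_pos hc, if_pos (Or.inl hm), if_pos (hcond.mpr ⟨hc, hm⟩)]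
          · rw [if_pos hc, if_neg ?_, if_neg (fun h => hm (hcond.mp h).2)]
            rintro (h | h)
            · exact hm h
            · simp at h
        · rw [if_neg hc, if_neg (fun h => hc (hcond.mp h).1)]

-- ===== VERDICT (by name: the statement is the Claim_ definition above) =====
theorem ChitTransition_spec : Claim_equal_ChitTransition := by
  intro M num pi qu _ _
  unfold Spec_ChitTransition ChitTransition ChitTransition_alt
  by_cases h : num = pi
  · simp only [h]
    exact pv_key M pi qu
  · simp only [if_neg h]
    exact pv_key M num pi
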